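-- pv_equiv track=rewrite | github.com/paul-coder-646/Advent-of-Code-2022 | Python /day9/day9.py | boundaryCheck
-- ===== SOURCE A (Python) =====
-- def boundaryCheck(input):
--     U = 0
--     D = 0
--     L = 0
--     R = 0
--     for i, instruction in enumerate(input):
--         match instruction[0]:
--             case "U":
--                 U += instruction[1]
--             case "D":
--                 D += instruction[1]
--             case "L":
--                 L += instruction[1]
--             case "R":
--                 R += instruction[1]
--
--     return max(U, D, L, R)
-- ===== SOURCE B (Python) =====
-- def boundaryCheck(input):
--     return max(sum(n for d, n in input if d == c) for c in ("U", "D", "L", "R"))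
-- ===== Notes on version B (the rewrite author's own statement) =====
-- stated objective: simpler
-- what changed: Replaces the four mutable counters and the single match-loop by four independent per-direction sums via generator expressions, taking the max of the four sums.
import Mathlib
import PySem

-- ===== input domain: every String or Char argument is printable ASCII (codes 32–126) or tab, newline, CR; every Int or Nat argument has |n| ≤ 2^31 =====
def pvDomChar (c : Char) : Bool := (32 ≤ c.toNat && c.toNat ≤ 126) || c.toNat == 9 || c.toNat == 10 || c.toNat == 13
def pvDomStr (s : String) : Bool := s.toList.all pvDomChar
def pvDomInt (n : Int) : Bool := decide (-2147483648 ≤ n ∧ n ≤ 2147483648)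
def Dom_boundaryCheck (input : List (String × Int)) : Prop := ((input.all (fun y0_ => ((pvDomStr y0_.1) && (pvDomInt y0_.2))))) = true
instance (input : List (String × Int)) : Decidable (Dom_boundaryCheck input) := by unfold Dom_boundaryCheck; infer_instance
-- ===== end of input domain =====

-- B replaces A's four mutable counters and match-loop by four independent per-direction
-- sums (generator expressions) and takes the max of the four sums; objective: simpler.

-- ===== PORT A =====
-- four counters updated through one pass; branches in the match's order
def boundaryCheck (input : List (String × Int)) : Int :=
  let s := input.foldl
    (fun (st : Int × Int × Int × Int) ins =>
      let (U, D, L, R) := st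
      if ins.1 = "U" then (U + ins.2, D, L, R)
      else if ins.1 = "D" then (U, D + ins.2, L, R)
      else if ins.1 = "L" then (U, D, L + ins.2, R)
      else if ins.1 = "R" then (U, D, L, R + ins.2)
      else st)
    (0, 0, 0, 0)
  max s.1 (max s.2.1 (max s.2.2.1 s.2.2.2))

-- ===== PORT B =====
-- sum(n for d, n in input if d == c): filter then sum (Python's sum = left fold from 0)
def dirSum (input : List (String × Int)) (c : String) : Int :=
  ((input.filter (fun p => p.1 == c)).map Prod.snd).foldl (· + ·) 0

def boundaryCheck_alt (input : List (String × Int)) : Int :=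
  max (dirSum input "U") (max (dirSum input "D") (max (dirSum input "L") (dirSum input "R")))

-- ===== PRECONDITION & SPEC =====
def Spec_boundaryCheck (input : List (String × Int)) (out : Int) : Prop := out = boundaryCheck_alt input
instance (input : List (String × Int)) (out : Int) : Decidable (Spec_boundaryCheck input out) := by unfold Spec_boundaryCheck; infer_instance

-- ===== CLAIM (what is proved, stated in full; the proofs are below) =====
def Claim_equal_boundaryCheck : Prop := ∀ (input : List (String × Int)), Dom_boundaryCheck input → Spec_boundaryCheck input (boundaryCheck input)

-- ===== LEMMAS AND PROOFS =====

theorem foldl_add_shift (l : List Int) (a : Int) :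
    l.foldl (· + ·) a = a + l.foldl (· + ·) 0 := by
  induction l generalizing a with
  | nil => simp
  | cons x xs ih =>
    simp only [List.foldl_cons]
    rw [ih (a + x), ih (0 + x)]
    ring

theorem dirSum_cons (x : String × Int) (xs : List (String × Int)) (c : String) :
    dirSum (x :: xs) c = (if x.1 = c then x.2 else 0) + dirSum xs c := by
  unfold dirSum
  by_cases h : x.1 = c
  · simp only [List.filter_cons, h, beq_self_eq_true, if_pos, List.map_cons, List.foldl_cons]
    rw [foldl_add_shift]
    simp
  · simp [h]

theorem foldA_char (input : List (String × Int)) (u d l r : Int) :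
    input.foldl
      (fun (st : Int × Int × Int × Int) ins =>
        let (U, D, L, R) := st
        if ins.1 = "U" then (U + ins.2, D, L, R)
        else if ins.1 = "D" then (U, D + ins.2, L, R)
        else if ins.1 = "L" then (U, D, L + ins.2, R)
        else if ins.1 = "R" then (U, D, L, R + ins.2)
        else (U, D, L, R))
      (u, d, l, r)
    = (u + dirSum input "U", d + dirSum input "D",
       l + dirSum input "L", r + dirSum input "R") := by
  induction input generalizing u d l r with
  | nil => simp [dirSum]
  | cons x xs ih =>
    simp only [List.foldl_cons, dirSum_cons]
    by_cases hU : x.1 = "U"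
    · simp [hU, ih]; omega
    · by_cases hD : x.1 = "D"
      · simp [hD, ih]; omega
      · by_cases hL : x.1 = "L"
        · simp [hL, ih]; omega
        · by_cases hR : x.1 = "R"
          · simp [hR, ih]; omega
          · simp [hU, hD, hL, hR, ih]

-- ===== VERDICT (by name: the statement is the Claim_ definition above) =====
theorem boundaryCheck_spec : Claim_equal_boundaryCheck := by
  intro input _
  unfold Spec_boundaryCheck boundaryCheck boundaryCheck_alt
  simp [foldA_char]
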